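-- pv_equiv track=rewrite | github.com/daniel-reich/ubiquitous-fiesta | rPnq2ugsM7zsWr3Pf_18.py | find_all_digits
-- ===== SOURCE A (Python) =====
-- def find_all_digits(lst):
--   new,fnl,stg = '','',['0','1','2','3','4','5','6','7','8','9']
--   for ls in lst:
--       for a in range(len(str(ls))):
--           if str(ls)[a] in new:
--               new+=('-')
--           else: new+=str(ls)[a]
--       new+=' '
--       if all(x in new for x in stg):
--           return ls
--   return "Missing digits!"
-- ===== SOURCE B (Python) =====
-- DIGITS = "0123456789"
--
-- def find_all_digits(lst):
--     # Build a table: digit -> index of the element where it first appeared,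
--     # then the answer is the element completing the last-arriving digit.
--     first_seen = {}
--     for i, ls in enumerate(lst):
--         for ch in str(ls):
--             if ch in DIGITS and ch not in first_seen:
--                 first_seen[ch] = i
--     if len(first_seen) < 10:
--         return "Missing digits!"
--     return lst[max(first_seen.values())]
-- ===== Notes on version B (the rewrite author's own statement) =====
-- stated objective: faster
-- what changed: Replaces A's growing dedup-string with quadratic membership re-checks of all ten digits each round (and early return) by a single linear pass that records each digit's first element index in a dict, then answers lst[max(first_seen.values())] or the sentinel.
import Mathlib
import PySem

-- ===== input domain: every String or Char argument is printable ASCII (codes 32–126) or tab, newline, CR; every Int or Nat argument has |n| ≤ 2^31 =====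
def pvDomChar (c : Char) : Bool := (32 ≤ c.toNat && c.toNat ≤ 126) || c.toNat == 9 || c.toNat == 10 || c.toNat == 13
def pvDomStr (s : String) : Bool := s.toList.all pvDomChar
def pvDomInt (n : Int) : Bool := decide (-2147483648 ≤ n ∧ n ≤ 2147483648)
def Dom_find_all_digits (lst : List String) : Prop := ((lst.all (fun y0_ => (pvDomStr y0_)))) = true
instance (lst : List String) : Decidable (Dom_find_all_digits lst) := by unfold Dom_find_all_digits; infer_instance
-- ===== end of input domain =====

-- B replaces A's growing dedup-string with re-checks of all ten digits each round by a
-- first-occurrence index table built in one pass, answering lst[max(first_seen.values())].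

-- ===== PORT A =====
-- stg = ['0',…,'9'] (1-char strings; 'x in new' on a 1-char string is exactly char membership)
def pvDigitsA : List Char := ['0', '1', '2', '3', '4', '5', '6', '7', '8', '9']

-- the inner 'for a in range(len(str(ls)))' loop over the characters of ls (str(ls) = ls : String)
def pvAInner : List Char → List Char → List Char
  | new, [] => new
  | new, c :: rest => if new.contains c then pvAInner (new ++ ['-']) rest else pvAInner (new ++ [c]) rest

-- the outer 'for ls in lst' loop carrying the accumulated string 'new' (as List Char, exact)
def pvALoop : List Char → List String → String
  | _, [] => "Missing digits!"
  | new, ls :: rest =>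
      let new1 := pvAInner new ls.toList ++ [' ']
      if pvDigitsA.all (fun x => new1.contains x) then ls else pvALoop new1 rest

def find_all_digits (lst : List String) : String := pvALoop [] lst

-- ===== PORT B =====
def pvDigitsB : List Char := "0123456789".toList

-- the inner 'for ch in str(ls)' loop: record first_seen[ch] = i for unseen digit chars
def pvBStep (i : Int) (d : PySem.Dict Char Int) (s : String) : PySem.Dict Char Int :=
  s.toList.foldl (fun d ch => if pvDigitsB.contains ch && !(d.contains ch) then d.insert ch i else d) d

def find_all_digits_alt (lst : List String) : String :=
  let d := (PySem.List.enumerate lst 0).foldl (fun d p => pvBStep p.1 d p.2) PySem.Dict.empty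
  if d.size < 10 then "Missing digits!"
  else
    -- lst[max(first_seen.values())]; the values list is nonempty (size = 10) and every
    -- stored index is in range, so the none/getD fallbacks are unreachable
    match PySem.List.max? d.values (fun v => v) with
    | some m => (PySem.List.pyGet? lst m).getD ""
    | none => ""

-- ===== PRECONDITION & SPEC =====
def Spec_find_all_digits (lst : List String) (out : String) : Prop := out = find_all_digits_alt lst
instance (lst : List String) (out : String) : Decidable (Spec_find_all_digits lst out) := by unfold Spec_find_all_digits; infer_instance

-- ===== CLAIM (what is proved, stated in full; the proofs are below) =====
def Claim_equal_find_all_digits : Prop := ∀ (lst : List String), Dom_find_all_digits lst → Spec_find_all_digits lst (find_all_digits lst)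

-- ===== LEMMAS AND PROOFS =====

-- B's finishing step and the outer fold, named for the induction
def pvBFinish (lst : List String) (d : PySem.Dict Char Int) : String :=
  if d.size < 10 then "Missing digits!"
  else
    match PySem.List.max? d.values (fun v => v) with
    | some m => (PySem.List.pyGet? lst m).getD ""
    | none => ""

def pvBFold (l : List String) (i : Int) (d : PySem.Dict Char Int) : PySem.Dict Char Int :=
  (PySem.List.enumerate l i).foldl (fun d p => pvBStep p.1 d p.2) d

theorem pvAlt_eq (lst : List String) :
    find_all_digits_alt lst = pvBFinish lst (pvBFold lst 0 PySem.Dict.empty) := rfl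

theorem pvBFold_nil (i : Int) (d : PySem.Dict Char Int) : pvBFold [] i d = d := by
  simp [pvBFold, PySem.List.enumerate]

theorem pvBFold_cons (s : String) (rest : List String) (i : Int) (d : PySem.Dict Char Int) :
    pvBFold (s :: rest) i d = pvBFold rest (i + 1) (pvBStep i d s) := by
  simp [pvBFold, PySem.List.enumerate_cons]

-- characterisation of the inner B loop
theorem pvBStepL_contains (i : Int) (c : Char) :
    ∀ (cs : List Char) (d : PySem.Dict Char Int),
      (cs.foldl (fun d ch => if pvDigitsB.contains ch && !(d.contains ch) then d.insert ch i else d) d).contains c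
        = (d.contains c || (pvDigitsB.contains c && cs.contains c)) := by
  intro cs
  induction cs with
  | nil => intro d; simp
  | cons ch rest ih =>
    intro d
    simp only [List.foldl_cons]
    by_cases hch : (pvDigitsB.contains ch && !(d.contains ch)) = true
    · rw [if_pos hch, ih, PySem.Dict.contains_insert]
      simp only [Bool.and_eq_true, Bool.not_eq_true'] at hch
      by_cases hc : c = ch
      · subst hc
        simp [hch.2, (by simpa using hch.1 : c ∈ pvDigitsB)]
      · have hb : (c == ch) = false := by simp [hc]
        simp [hb, hc]
    · rw [if_neg hch, ih]
      simp only [Bool.and_eq_true, Bool.not_eq_true', not_and_or, Bool.not_eq_false] at hch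
      by_cases hc : c = ch
      · subst hc
        rcases hch with h | h
        · simp [(by simpa using h : ¬ c ∈ pvDigitsB)]
        · simp [h]
      · simp [hc]

theorem pvBStepL_get_old (i : Int) (c : Char) :
    ∀ (cs : List Char) (d : PySem.Dict Char Int),
      d.contains c = true →
      (cs.foldl (fun d ch => if pvDigitsB.contains ch && !(d.contains ch) then d.insert ch i else d) d).get? c = d.get? c := by
  intro cs
  induction cs with
  | nil => intro d _; rfl
  | cons ch rest ih =>
    intro d hc
    simp only [List.foldl_cons]
    by_cases hch : (pvDigitsB.contains ch && !(d.contains ch)) = true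
    · rw [if_pos hch]
      simp only [Bool.and_eq_true, Bool.not_eq_true'] at hch
      have hne : c ≠ ch := fun h => by rw [h] at hc; rw [hc] at hch; exact absurd hch.2 (by simp)
      rw [ih _ (by rw [PySem.Dict.contains_insert]; simp [hc])]
      simp [PySem.Dict.get?_insert, hne]
    · rw [if_neg hch]; exact ih d hc

theorem pvBStepL_get_new (i : Int) (c : Char) :
    ∀ (cs : List Char) (d : PySem.Dict Char Int),
      d.contains c = false → pvDigitsB.contains c = true → c ∈ cs →
      (cs.foldl (fun d ch => if pvDigitsB.contains ch && !(d.contains ch) then d.insert ch i else d) d).get? c = some i := by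
  intro cs
  induction cs with
  | nil => intro d _ _ h; exact absurd h (by simp)
  | cons ch rest ih =>
    intro d hc hdig hmem
    simp only [List.foldl_cons]
    by_cases hcch : c = ch
    · subst hcch
      rw [if_pos (by simp [hc, (by simpa using hdig : c ∈ pvDigitsB)])]
      rw [pvBStepL_get_old i c rest _ (PySem.Dict.contains_insert_self _ _ _),
        PySem.Dict.get?_insert_self]
    · have hmem' : c ∈ rest := by rcases List.mem_cons.mp hmem with h | h; exact absurd h hcch; exact h
      by_cases hch : (pvDigitsB.contains ch && !(d.contains ch)) = true
      · rw [if_pos hch]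
        exact ih _ (by rw [PySem.Dict.contains_insert]; simp [hc, hcch]) hdig hmem'
      · rw [if_neg hch]; exact ih _ hc hdig hmem'

theorem pvBStepL_values (i : Int) :
    ∀ (cs : List Char) (d : PySem.Dict Char Int) (v : Int),
      v ∈ (cs.foldl (fun d ch => if pvDigitsB.contains ch && !(d.contains ch) then d.insert ch i else d) d).values →
      v = i ∨ v ∈ d.values := by
  intro cs
  induction cs with
  | nil => intro d v hv; exact Or.inr hv
  | cons ch rest ih =>
    intro d v hv
    simp only [List.foldl_cons] at hv
    by_cases hch : (pvDigitsB.contains ch && !(d.contains ch)) = true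
    · rw [if_pos hch] at hv
      rcases ih _ v hv with h | h
      · exact Or.inl h
      · rcases PySem.Dict.mem_values_insert _ _ _ _ h with h' | h'
        · exact Or.inl h'
        · exact Or.inr h'
    · rw [if_neg hch] at hv; exact ih _ v hv

theorem pvBStepL_keys (i : Int) :
    ∀ (cs : List Char) (d : PySem.Dict Char Int) (c : Char),
      c ∈ (cs.foldl (fun d ch => if pvDigitsB.contains ch && !(d.contains ch) then d.insert ch i else d) d).keys →
      c ∈ d.keys ∨ c ∈ pvDigitsB := by
  intro cs
  induction cs with
  | nil => intro d c h; exact Or.inl h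
  | cons ch rest ih =>
    intro d c hc
    simp only [List.foldl_cons] at hc
    by_cases hch : (pvDigitsB.contains ch && !(d.contains ch)) = true
    · rw [if_pos hch] at hc
      rcases ih _ c hc with h | h
      · rcases (PySem.Dict.mem_keys_insert _ _ _ _).mp h with h' | h'
        · subst h'
          simp only [Bool.and_eq_true] at hch
          exact Or.inr (by simpa using hch.1)
        · exact Or.inl h'
      · exact Or.inr h
    · rw [if_neg hch] at hc; exact ih _ c hc

theorem pvBStepL_nodup (i : Int) :
    ∀ (cs : List Char) (d : PySem.Dict Char Int), d.keys.Nodup →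
      (cs.foldl (fun d ch => if pvDigitsB.contains ch && !(d.contains ch) then d.insert ch i else d) d).keys.Nodup := by
  intro cs
  induction cs with
  | nil => intro d h; exact h
  | cons ch rest ih =>
    intro d hd
    simp only [List.foldl_cons]
    by_cases hch : (pvDigitsB.contains ch && !(d.contains ch)) = true
    · rw [if_pos hch]; exact ih _ (PySem.Dict.nodup_keys_insert _ _ _ hd)
    · rw [if_neg hch]; exact ih _ hd

theorem pvBStepL_stable (i : Int) :
    ∀ (cs : List Char) (d : PySem.Dict Char Int), (∀ c ∈ pvDigitsB, d.contains c = true) →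
      cs.foldl (fun d ch => if pvDigitsB.contains ch && !(d.contains ch) then d.insert ch i else d) d = d := by
  intro cs
  induction cs with
  | nil => intro d _; rfl
  | cons ch rest ih =>
    intro d h
    simp only [List.foldl_cons]
    have hb : (pvDigitsB.contains ch && !(d.contains ch)) = false := by
      by_cases hm : ch ∈ pvDigitsB
      · rw [h ch hm]; simp
      · rw [(by simpa using hm : pvDigitsB.contains ch = false)]; simp
    rw [if_neg (by rw [hb]; simp)]
    exact ih d h

theorem pvBStep_stable (i : Int) (s : String) (d : PySem.Dict Char Int)
    (h : ∀ c ∈ pvDigitsB, d.contains c = true) : pvBStep i d s = d :=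
  pvBStepL_stable i s.toList d h

theorem pvBFold_stable (l : List String) : ∀ (i : Int) (d : PySem.Dict Char Int),
    (∀ c ∈ pvDigitsB, d.contains c = true) → pvBFold l i d = d := by
  induction l with
  | nil => intro i d _; exact pvBFold_nil i d
  | cons s rest ih =>
    intro i d h
    rw [pvBFold_cons, pvBStep_stable i s d h]
    exact ih _ d h

-- characterisation of the inner A loop: membership of non-'-' chars
theorem pvAInner_mem (c : Char) (hc : c ≠ '-') :
    ∀ (cs new : List Char), (c ∈ pvAInner new cs ↔ c ∈ new ∨ c ∈ cs) := by
  intro cs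
  induction cs with
  | nil => intro new; simp [pvAInner]
  | cons ch rest ih =>
    intro new
    simp only [pvAInner]
    by_cases hch : new.contains ch
    · rw [if_pos hch, ih]
      simp only [List.mem_append, List.mem_cons, List.not_mem_nil, or_false]
      constructor
      · rintro ((h | h) | h)
        · exact Or.inl h
        · exact absurd h hc
        · exact Or.inr (Or.inr h)
      · rintro (h | h | h)
        · exact Or.inl (Or.inl h)
        · subst h; exact Or.inl (Or.inl (by simpa using hch))
        · exact Or.inr h
    · rw [if_neg hch, ih]
      simp only [List.mem_append, List.mem_cons, List.not_mem_nil, or_false]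
      tauto

theorem pvDigits_eq : pvDigitsB = pvDigitsA := by decide

-- a Nodup key list included in the ten digits, missing one of them, has length < 10
theorem pvKeysLt (ks : List Char) (hnd : ks.Nodup) (hsub : ∀ c ∈ ks, c ∈ pvDigitsA)
    (c0 : Char) (hc0d : c0 ∈ pvDigitsA) (hc0 : c0 ∉ ks) : ks.length < 10 := by
  have hsub' : ks.toFinset ⊆ pvDigitsA.toFinset := by
    intro c hc
    rw [List.mem_toFinset] at hc ⊢
    exact hsub c hc
  have hss : ks.toFinset ⊂ pvDigitsA.toFinset :=
    ⟨hsub', fun hsup => hc0 (List.mem_toFinset.mp (hsup (List.mem_toFinset.mpr hc0d)))⟩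
  have hcard := Finset.card_lt_card hss
  have h10 : pvDigitsA.toFinset.card = 10 := by decide
  have hlen : ks.toFinset.card = ks.length := List.toFinset_card_of_nodup hnd
  omega

-- main induction
theorem pvMain : ∀ (l : List String) (n : Nat) (d : PySem.Dict Char Int) (new : List Char) (lst : List String),
    lst.drop n = l →
    (∀ c ∈ pvDigitsA, (c ∈ new ↔ d.contains c = true)) →
    (∀ v ∈ d.values, v < (n : Int)) →
    d.keys.Nodup →
    (∀ c ∈ d.keys, c ∈ pvDigitsA) →
    (∃ c ∈ pvDigitsA, d.contains c = false) →
    pvALoop new l = pvBFinish lst (pvBFold l (n : Int) d) := by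
  intro l
  induction l with
  | nil =>
    intro n d new lst hdrop h1 h2 hnd hsub hex
    obtain ⟨c0, hc0d, hc0⟩ := hex
    rw [pvBFold_nil]
    have hc0k : c0 ∉ d.keys := by
      intro hk
      have hct := (PySem.Dict.contains_iff_mem_keys _ _).mpr hk
      rw [hc0] at hct
      cases hct
    have hlen : d.keys.length < 10 := pvKeysLt d.keys hnd hsub c0 hc0d hc0k
    have hkl : d.keys.length = d.size := by simp [PySem.Dict.keys, PySem.Dict.size]
    have hsize : d.size < 10 := by omega
    simp [pvALoop, pvBFinish, hsize]
  | cons s rest ih =>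
    intro n d new lst hdrop h1 h2 hnd hsub hex
    obtain ⟨c0, hc0d, hc0⟩ := hex
    rw [pvBFold_cons]
    set new1 := pvAInner new s.toList ++ [' '] with hnew1
    set d1 := pvBStep (n : Int) d s with hd1
    have hdig_dash : ∀ c ∈ pvDigitsA, c ≠ '-' := by intro c hc; fin_cases hc <;> decide
    have hdig_sp : ∀ c ∈ pvDigitsA, c ≠ ' ' := by intro c hc; fin_cases hc <;> decide
    -- digit membership in new1
    have hmem1 : ∀ c ∈ pvDigitsA, (c ∈ new1 ↔ c ∈ new ∨ c ∈ s.toList) := by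
      intro c hc
      rw [hnew1]
      simp only [List.mem_append, List.mem_cons, List.not_mem_nil, or_false]
      rw [pvAInner_mem c (hdig_dash c hc)]
      constructor
      · rintro ((h | h) | h)
        · exact Or.inl h
        · exact Or.inr h
        · exact absurd h (hdig_sp c hc)
      · rintro (h | h)
        · exact Or.inl (Or.inl h)
        · exact Or.inl (Or.inr h)
    -- digit containment in d1
    have hcont1 : ∀ c, d1.contains c = (d.contains c || (pvDigitsB.contains c && s.toList.contains c)) :=
      fun c => pvBStepL_contains (n : Int) c s.toList d
    have H1' : ∀ c ∈ pvDigitsA, (c ∈ new1 ↔ d1.contains c = true) := by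
      intro c hc
      have hcB : pvDigitsB.contains c = true := by
        rw [pvDigits_eq]; simpa using hc
      rw [hmem1 c hc, hcont1 c, hcB]
      simp [h1 c hc]
    have hnd1 : d1.keys.Nodup := pvBStepL_nodup _ _ d hnd
    have hsub1 : ∀ c ∈ d1.keys, c ∈ pvDigitsA := by
      intro c hc
      rcases pvBStepL_keys _ _ d c hc with h | h
      · exact hsub c h
      · exact pvDigits_eq ▸ h
    simp only [pvALoop]
    rw [← hnew1]
    by_cases hAll : (pvDigitsA.all fun x => new1.contains x) = true
    · rw [if_pos hAll]
      have hallm : ∀ c ∈ pvDigitsA, c ∈ new1 := by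
        intro c hc
        have := List.all_eq_true.mp hAll c hc
        simpa using this
      have hall1 : ∀ c ∈ pvDigitsA, d1.contains c = true :=
        fun c hc => (H1' c hc).mp (hallm c hc)
      have hallB : ∀ c ∈ pvDigitsB, d1.contains c = true := by
        rw [pvDigits_eq]; exact hall1
      rw [pvBFold_stable rest _ d1 hallB]
      -- size = 10
      have hkeys_eq : d1.keys.toFinset = pvDigitsA.toFinset := by
        apply Finset.Subset.antisymm
        · intro c hc
          rw [List.mem_toFinset] at hc ⊢
          exact hsub1 c hc
        · intro c hc
          rw [List.mem_toFinset] at hc ⊢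
          exact (PySem.Dict.contains_iff_mem_keys _ _).mp (hall1 c hc)
      have hlen10 : d1.keys.length = 10 := by
        rw [← List.toFinset_card_of_nodup hnd1, hkeys_eq]
        decide
      have hkl : d1.keys.length = d1.size := by simp [PySem.Dict.keys, PySem.Dict.size]
      have hsize1 : ¬ d1.size < 10 := by omega
      -- every stored index is ≤ n
      have hvle : ∀ v ∈ d1.values, v ≤ (n : Int) := by
        intro v hv
        rcases pvBStepL_values _ _ d v hv with h | h
        · exact le_of_eq h
        · exact le_of_lt (h2 v h)
      -- the digit c0 missing before this round was completed here, at index n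
      have hc0s : c0 ∈ s.toList := by
        rcases (hmem1 c0 hc0d).mp (hallm c0 hc0d) with h | h
        · rw [(h1 c0 hc0d).mp h] at hc0; cases hc0
        · exact h
      have hget : d1.get? c0 = some (n : Int) :=
        pvBStepL_get_new _ c0 s.toList d hc0 (by rw [pvDigits_eq]; simpa using hc0d) hc0s
      have hval : (n : Int) ∈ d1.values := by
        have hit := PySem.Dict.mem_items_of_get?_eq_some _ hget
        simp only [PySem.Dict.values, List.mem_map]
        exact ⟨(c0, (n : Int)), hit, rfl⟩
      obtain ⟨m, hm⟩ : ∃ m, PySem.List.max? d1.values (fun v => v) = some m := by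
        cases hmax : PySem.List.max? d1.values (fun v => v) with
        | none =>
          rw [PySem.List.max?_eq_none_iff] at hmax
          rw [hmax] at hval
          cases hval
        | some m => exact ⟨m, rfl⟩
      have hmn : m = (n : Int) :=
        le_antisymm (hvle m (PySem.List.max?_mem hm)) (PySem.List.max?_isMax hm _ hval)
      have hgetlst : lst[n]? = some s := by
        have h0 : (lst.drop n)[0]? = some s := by rw [hdrop]; rfl
        rw [List.getElem?_drop] at h0
        simpa using h0
      rw [pvBFinish, if_neg hsize1, hm, hmn]
      simp [hgetlst]
    · rw [if_neg hAll]
      -- a digit still missing after this round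
      have hexnew : ∃ c ∈ pvDigitsA, c ∉ new1 := by
        by_contra hcon
        push Not at hcon
        exact hAll (List.all_eq_true.mpr fun c hc => by simpa using hcon c hc)
      obtain ⟨c1, hc1d, hc1n⟩ := hexnew
      have hc1 : d1.contains c1 = false := by
        cases hb : d1.contains c1 with
        | false => rfl
        | true => exact absurd ((H1' c1 hc1d).mpr hb) hc1n
      have hdrop' : lst.drop (n + 1) = rest := by
        rw [← List.tail_drop, hdrop]
        rfl
      have hvals' : ∀ v ∈ d1.values, v < ((n + 1 : Nat) : Int) := by
        intro v hv
        push_cast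
        rcases pvBStepL_values _ _ d v hv with h | h
        · omega
        · have := h2 v h; omega
      have ih' := ih (n + 1) d1 new1 lst hdrop' H1' hvals' hnd1 hsub1 ⟨c1, hc1d, hc1⟩
      rw [show ((n : Int) + 1) = ((n + 1 : Nat) : Int) by push_cast; ring]
      exact ih'

-- ===== VERDICT (by name: the statement is the Claim_ definition above) =====
theorem find_all_digits_spec : Claim_equal_find_all_digits := by
  intro lst _
  show find_all_digits lst = find_all_digits_alt lst
  rw [pvAlt_eq]
  exact pvMain lst 0 PySem.Dict.empty [] lst rfl
    (by intro c _; simp [PySem.Dict.contains_empty])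
    (by intro v hv; simp [PySem.Dict.values, PySem.Dict.empty] at hv)
    (by simp [PySem.Dict.keys, PySem.Dict.empty])
    (by intro c hc; simp [PySem.Dict.keys, PySem.Dict.empty] at hc)
    ⟨'0', by decide, by simp [PySem.Dict.contains_empty]⟩
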